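-- pv_equiv track=rewrite | github.com/datablogin/PaidSearchNav-MCP | archive/old_app/paidsearchnav/analyzers/negative_conflicts.py | _index_negatives_by_level
-- ===== SOURCE A (Python) =====
-- from typing import TYPE_CHECKING, Any, Callable, Optional, Union
--
-- def _index_negatives_by_level(
--     negative_keywords: list[dict[str, Any]]
-- ) -> dict[str, list[dict[str, Any]]]:
--     """Index negative keywords by level for faster lookup.
--
--     Args:
--         negative_keywords: List of negative keywords
--
--     Returns:
--         Dictionary indexed by level (SHARED, CAMPAIGN, AD_GROUP)
--     """
--     index = {"SHARED": [], "CAMPAIGN": [], "AD_GROUP": []}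
--
--     for neg in negative_keywords:
--         level = neg.get("level", "CAMPAIGN")
--         if level in index:
--             index[level].append(neg)
--
--     return index
-- ===== SOURCE B (Python) =====
-- def _index_negatives_by_level(negative_keywords):
--     """Index negative keywords by level: one filtering pass per fixed level."""
--     return {
--         level: [neg for neg in negative_keywords
--                 if neg.get("level", "CAMPAIGN") == level]
--         for level in ("SHARED", "CAMPAIGN", "AD_GROUP")
--     }
-- ===== Notes on version B (the rewrite author's own statement) =====
-- stated objective: alternative
-- what changed: Replaces the single dispatch loop that appends into a pre-built mutable dict with a dict comprehension over the three fixed levels, each built by filtering the input list once per level.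
import Mathlib
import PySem

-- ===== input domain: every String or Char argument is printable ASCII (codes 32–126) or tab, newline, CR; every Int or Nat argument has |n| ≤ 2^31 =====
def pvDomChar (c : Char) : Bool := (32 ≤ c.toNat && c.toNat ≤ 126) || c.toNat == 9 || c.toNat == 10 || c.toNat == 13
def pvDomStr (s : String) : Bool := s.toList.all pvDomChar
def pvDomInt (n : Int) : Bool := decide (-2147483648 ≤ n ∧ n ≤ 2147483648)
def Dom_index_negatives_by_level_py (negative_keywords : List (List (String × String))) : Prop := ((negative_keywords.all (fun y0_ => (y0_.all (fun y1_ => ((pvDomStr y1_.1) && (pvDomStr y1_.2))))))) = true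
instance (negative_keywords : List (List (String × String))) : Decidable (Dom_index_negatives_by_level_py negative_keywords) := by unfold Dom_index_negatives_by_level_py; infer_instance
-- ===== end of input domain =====

-- B groups the negatives by filtering the input once per fixed level instead of A's
-- single dispatch loop appending into a pre-built dict (objective: alternative decomposition).

-- ===== PORT A =====
-- neg.get("level", "CAMPAIGN") : first-match lookup in the association list
def pvLevelOf (neg : List (String × String)) : String :=
  (PySem.Dict.mk neg).getD "level" "CAMPAIGN"

-- literal port of A: index = {"SHARED": [], "CAMPAIGN": [], "AD_GROUP": []};
-- loop body: level = neg.get("level","CAMPAIGN"); if level in index: index[level].append(neg)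
def pvStepA (d : PySem.Dict String (List (List (String × String))))
    (neg : List (String × String)) : PySem.Dict String (List (List (String × String))) :=
  let level := pvLevelOf neg
  if d.contains level then d.modify level [] (· ++ [neg]) else d

def index_negatives_by_level_py (negative_keywords : List (List (String × String))) : List (String × List (List (String × String))) :=
  (negative_keywords.foldl pvStepA
    (PySem.Dict.mk [("SHARED", []), ("CAMPAIGN", []), ("AD_GROUP", [])])).items

-- ===== PORT B =====
-- literal port of B: {lvl: [n for n in negs if n.get("level","CAMPAIGN") == lvl] for lvl in (...)}
def index_negatives_by_level_py_alt (negative_keywords : List (List (String × String))) : List (String × List (List (String × String))) :=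
  ["SHARED", "CAMPAIGN", "AD_GROUP"].map
    (fun lvl => (lvl, negative_keywords.filter (fun neg => pvLevelOf neg == lvl)))

-- ===== PRECONDITION & SPEC =====
def Spec_index_negatives_by_level_py (negative_keywords : List (List (String × String))) (out : List (String × List (List (String × String)))) : Prop := out = index_negatives_by_level_py_alt negative_keywords
instance (negative_keywords : List (List (String × String))) (out : List (String × List (List (String × String)))) : Decidable (Spec_index_negatives_by_level_py negative_keywords out) := by unfold Spec_index_negatives_by_level_py; infer_instance

-- ===== CLAIM (what is proved, stated in full; the proofs are below) =====
def Claim_equal_index_negatives_by_level_py : Prop := ∀ (negative_keywords : List (List (String × String))), Dom_index_negatives_by_level_py negative_keywords → Spec_index_negatives_by_level_py negative_keywords (index_negatives_by_level_py negative_keywords)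

-- ===== LEMMAS AND PROOFS =====

-- One step of A's loop on a dict with the three fixed keys.
theorem pvStepA_mk (s c g : List (List (String × String))) (n : List (String × String)) :
    pvStepA (PySem.Dict.mk [("SHARED", s), ("CAMPAIGN", c), ("AD_GROUP", g)]) n =
    PySem.Dict.mk
      [("SHARED", s ++ if pvLevelOf n == "SHARED" then [n] else []),
       ("CAMPAIGN", c ++ if pvLevelOf n == "CAMPAIGN" then [n] else []),
       ("AD_GROUP", g ++ if pvLevelOf n == "AD_GROUP" then [n] else [])] := by
  by_cases h1 : pvLevelOf n = "SHARED"
  · simp [pvStepA, h1, PySem.Dict.contains, PySem.Dict.modify, PySem.Dict.insert,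
          PySem.Dict.getD, PySem.Dict.get?]
  · by_cases h2 : pvLevelOf n = "CAMPAIGN"
    · simp [pvStepA, h2, PySem.Dict.contains, PySem.Dict.modify, PySem.Dict.insert,
            PySem.Dict.getD, PySem.Dict.get?]
    · by_cases h3 : pvLevelOf n = "AD_GROUP"
      · simp [pvStepA, h3, PySem.Dict.contains, PySem.Dict.modify, PySem.Dict.insert,
              PySem.Dict.getD, PySem.Dict.get?]
      · have hc : (PySem.Dict.mk [("SHARED", s), ("CAMPAIGN", c), ("AD_GROUP", g)]).contains
            (pvLevelOf n) = false := by
          simp [PySem.Dict.contains]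
          exact ⟨fun h => h1 h.symm, fun h => h2 h.symm, fun h => h3 h.symm⟩
        simp [pvStepA, hc, h1, h2, h3]

-- Invariant of A's loop: starting from the three fixed keys with accumulators s, c, g,
-- the fold appends exactly the matching negatives to each bucket.
theorem pv_foldl_inv (negs : List (List (String × String)))
    (s c g : List (List (String × String))) :
    negs.foldl pvStepA
      (PySem.Dict.mk [("SHARED", s), ("CAMPAIGN", c), ("AD_GROUP", g)]) =
    PySem.Dict.mk
      [("SHARED", s ++ negs.filter (fun n => pvLevelOf n == "SHARED")),
       ("CAMPAIGN", c ++ negs.filter (fun n => pvLevelOf n == "CAMPAIGN")),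
       ("AD_GROUP", g ++ negs.filter (fun n => pvLevelOf n == "AD_GROUP"))] := by
  induction negs generalizing s c g with
  | nil => simp
  | cons n ns ih =>
    rw [List.foldl_cons, pvStepA_mk, ih]
    simp only [List.filter_cons]
    split_ifs <;> simp [List.append_assoc]

-- ===== VERDICT (by name: the statement is the Claim_ definition above) =====
theorem index_negatives_by_level_py_spec : Claim_equal_index_negatives_by_level_py := by
  intro negs _
  unfold Spec_index_negatives_by_level_py index_negatives_by_level_py index_negatives_by_level_py_alt
  rw [pv_foldl_inv]
  simp
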